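-- pv_equiv track=rewrite | github.com/Racso08/Decodification_ARM | Python Code/Decodificador.py | codificacionROR
-- ===== SOURCE A (Python) =====
-- def codificacionROR(a_string):
--
--     ASCII_values = []
--     for character in a_string:
--         ASCII_values.append(ord(character))
--
--     HEX_values = []
--     for i in ASCII_values:
--         HEX_values.append(hex(i))
--
--     corrimientos = 0x07
--
--     codificado = ['0x03', hex(corrimientos)]
--
--     for x in HEX_values:
--         byte = bin(int(x, 16))[2:]
--
--         while len(byte) < 8:
--             byte = '0' + byte
--
--         Lfirst = byte[0:corrimientos]
--         Lsecond = byte[corrimientos:]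
--
--         byte = '0b' + Lsecond + Lfirst
--
--         codificado.append(hex(int(byte,2)))
--
--     codificado.append('0xFF')
--
--     return codificado
-- ===== SOURCE B (Python) =====
-- def codificacionROR(a_string):
--     # One pass, arithmetic ROR-1 on the 8-bit value of each character.
--     return (['0x03', hex(0x07)]
--             + [hex(((ord(c) & 1) << 7) | (ord(c) >> 1)) for c in a_string]
--             + ['0xFF'])
-- ===== Notes on version B (the rewrite author's own statement) =====
-- stated objective: simpler
-- what changed: Replaces the three list-building loops and the per-character binary-string padding/slicing rotation with a single comprehension computing the 8-bit ROR-1 arithmetically as ((v&1)<<7)|(v>>1).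
import Mathlib
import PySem

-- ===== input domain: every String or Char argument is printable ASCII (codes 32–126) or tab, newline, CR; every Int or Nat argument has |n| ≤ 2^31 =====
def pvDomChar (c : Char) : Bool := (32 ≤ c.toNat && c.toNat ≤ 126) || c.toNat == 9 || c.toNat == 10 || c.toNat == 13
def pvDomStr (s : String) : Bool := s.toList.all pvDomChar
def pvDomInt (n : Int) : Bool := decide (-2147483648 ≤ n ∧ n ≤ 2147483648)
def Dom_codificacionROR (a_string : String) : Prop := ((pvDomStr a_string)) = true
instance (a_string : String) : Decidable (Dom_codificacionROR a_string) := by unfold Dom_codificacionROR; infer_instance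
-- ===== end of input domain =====

-- B replaces A's three loops and binary-string padding/slicing with one map doing the 8-bit ROR-1 arithmetically (objective: simpler).

-- hex(n): exact transliteration of Python's hex() for 0 ≤ n (all values both programs hex are ≥ 0)
def pvHexDigit (n : Nat) : Char := "0123456789abcdef".toList.getD n '0'

-- fuel = n+1 always suffices (n/16 < n); structural so the kernel can evaluate it
def pvHexCharsAux : Nat → Nat → List Char
  | 0, _ => []
  | fuel + 1, n => if n < 16 then [pvHexDigit n] else pvHexCharsAux fuel (n / 16) ++ [pvHexDigit (n % 16)]

def pvHexChars (n : Nat) : List Char := pvHexCharsAux (n + 1) n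

def pvHex (n : Int) : String := String.ofList ('0' :: 'x' :: pvHexChars n.toNat)

-- ===== PORT A =====
-- the "while len(byte) < 8: byte = '0' + byte" padding loop
def pvPad8Aux : Nat → List Char → List Char
  | 0, cs => cs
  | fuel + 1, cs => if cs.length < 8 then pvPad8Aux fuel ('0' :: cs) else cs

-- the loop adds at most 8 chars, so fuel 8 runs it to completion on every input
def pvPad8 (cs : List Char) : List Char := pvPad8Aux 8 cs

def codificacionROR (a_string : String) : List String :=
  let ASCII_values := a_string.toList.foldl (fun acc character => acc ++ [(character.toNat : Int)]) []
  let HEX_values := ASCII_values.foldl (fun acc i => acc ++ [pvHex i]) []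
  let corrimientos : Int := 0x07
  let codificado : List String := ["0x03", pvHex corrimientos]
  let codificado := HEX_values.foldl (fun acc x =>
    let byte := PySem.List.slice (PySem.Int.pyBin ((PySem.Int.ofCharsBase? x.toList 16).getD 0)).toList (some 2) none
    let byte := pvPad8 byte
    let Lfirst := PySem.List.slice byte (some 0) (some corrimientos)
    let Lsecond := PySem.List.slice byte (some corrimientos) none
    let byte2 := '0' :: 'b' :: (Lsecond ++ Lfirst)
    acc ++ [pvHex ((PySem.Int.ofCharsBase? byte2 2).getD 0)]) codificado
  codificado ++ ["0xFF"]

-- ===== PORT B =====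
def codificacionROR_alt (a_string : String) : List String :=
  "0x03" :: pvHex 0x07 ::
    (a_string.toList.map (fun c =>
      pvHex (PySem.Int.bor (PySem.Int.band ((c.toNat : Int)) 1 <<< 7) ((c.toNat : Int) >>> (1 : Nat))))
    ++ ["0xFF"])

-- ===== PRECONDITION & SPEC =====
def Spec_codificacionROR (a_string : String) (out : List String) : Prop := out = codificacionROR_alt a_string
instance (a_string : String) (out : List String) : Decidable (Spec_codificacionROR a_string out) := by unfold Spec_codificacionROR; infer_instance

-- ===== CLAIM (what is proved, stated in full; the proofs are below) =====
def Claim_equal_codificacionROR : Prop := ∀ (a_string : String), Dom_codificacionROR a_string → Spec_codificacionROR a_string (codificacionROR a_string)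

-- ===== LEMMAS AND PROOFS =====

-- A's per-character pipeline (on the char-list level) equals B's arithmetic ROR-1,
-- for every code an in-domain character can have
set_option maxRecDepth 8192 in
set_option maxHeartbeats 2000000 in
theorem pv_step_eq : ∀ n : Fin 128,
    (PySem.Int.ofCharsBase?
      ('0' :: 'b' ::
        (PySem.List.slice (pvPad8 (PySem.List.slice
            (PySem.Int.toBinChars0b ((PySem.Int.ofCharsBase? ('0' :: 'x' :: pvHexChars (n : Nat)) 16).getD 0)) (some 2) none))
            (some 7) none
         ++ PySem.List.slice (pvPad8 (PySem.List.slice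
            (PySem.Int.toBinChars0b ((PySem.Int.ofCharsBase? ('0' :: 'x' :: pvHexChars (n : Nat)) 16).getD 0)) (some 2) none))
            (some 0) (some 7))) 2).getD 0
    = PySem.Int.bor (PySem.Int.band (((n : Nat) : Int)) 1 <<< 7) ((((n : Nat)) : Int) >>> (1 : Nat)) := by
  decide

-- ===== VERDICT (by name: the statement is the Claim_ definition above) =====
theorem codificacionROR_spec : Claim_equal_codificacionROR := by
  intro s hdom
  unfold Spec_codificacionROR codificacionROR codificacionROR_alt
  simp only [PySem.List.foldl_append_singleton_eq_map, List.map_map, List.nil_append,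
    List.cons_append]
  refine congrArg _ (congrArg _ (congrArg (· ++ ["0xFF"]) ?_))
  apply List.map_congr_left
  intro c hc
  have hdc : pvDomChar c = true := (List.all_eq_true.mp hdom) c hc
  have hlt : c.toNat < 128 := by
    simp [pvDomChar] at hdc
    omega
  simp only [Function.comp, pvHex, String.toList_ofList, PySem.Int.toList_pyBin,
    Int.toNat_natCast]
  obtain ⟨m, hm⟩ : ∃ m : Fin 128, c.toNat = m.val := ⟨⟨c.toNat, hlt⟩, rfl⟩
  rw [hm]
  exact congrArg (fun k : Int => String.ofList ('0' :: 'x' :: pvHexChars k.toNat)) (pv_step_eq m)
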